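-- pv_equiv track=rewrite | github.com/knakaji1210/lecture_polymphys_chaindynamics | legacy/singleChainDynamicsFunc_Reptation.py | centerOfMassDist
-- ===== SOURCE A (Python) =====
-- def centerOfMassDist(cx_list, cy_list, t_max):
--     Dc2_list = []
--     for i in range(t_max):
--         cx0 = cx_list[0]
--         cy0 = cy_list[0]
--         cx = cx_list[i]
--         cy = cy_list[i]
--         Dc2 = (cx0 - cx)**2 + (cy0 - cy)**2
--         Dc2_list.append(Dc2)
--     Dc2_list_steps = [ Dc2_list[:i] for i in range(t_max+1) ]
--     Dc2_list_steps = Dc2_list_steps[1:]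
--     return Dc2_list, Dc2_list_steps
-- ===== SOURCE B (Python) =====
-- def centerOfMassDist(cx_list, cy_list, t_max):
--     n = max(t_max, 0)
--     Dc2_list = [(cx_list[0] - x)**2 + (cy_list[0] - y)**2
--                 for x, y in zip(cx_list[:n], cy_list[:n])]
--     steps = []
--     cur = Dc2_list
--     while cur:
--         steps.append(cur)
--         cur = cur[:-1]
--     steps.reverse()
--     return Dc2_list, steps
-- ===== Notes on version B (the rewrite author's own statement) =====
-- stated objective: alternative
-- what changed: B computes the squared displacements with a zip over the two truncated coordinate lists (no index arithmetic), then generates the prefix lists back-to-front by repeatedly trimming the last element of the full list and reversing at the end, instead of A's index loop plus forward prefix-slicing comprehension with a [1:] trim.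
import Mathlib
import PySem

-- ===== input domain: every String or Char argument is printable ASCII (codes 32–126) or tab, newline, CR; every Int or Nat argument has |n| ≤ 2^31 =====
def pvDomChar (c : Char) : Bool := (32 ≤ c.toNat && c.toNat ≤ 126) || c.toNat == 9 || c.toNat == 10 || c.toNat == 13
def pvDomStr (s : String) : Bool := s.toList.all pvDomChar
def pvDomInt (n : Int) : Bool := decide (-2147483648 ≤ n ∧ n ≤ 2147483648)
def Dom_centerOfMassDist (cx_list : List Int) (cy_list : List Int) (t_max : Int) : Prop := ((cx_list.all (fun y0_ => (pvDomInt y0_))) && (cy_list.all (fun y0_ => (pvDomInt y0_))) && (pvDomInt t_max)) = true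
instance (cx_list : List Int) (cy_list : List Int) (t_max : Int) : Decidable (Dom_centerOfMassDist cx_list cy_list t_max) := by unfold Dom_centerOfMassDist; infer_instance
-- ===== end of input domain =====

-- B replaces A's index loop and forward prefix-slicing comprehension by a zip-based
-- comprehension over the truncated coordinate lists and a back-to-front prefix
-- generation (trim the last element repeatedly, then reverse) — objective: alternative.

-- ===== PORT A =====
def centerOfMassDist (cx_list : List Int) (cy_list : List Int) (t_max : Int) : List Int × List (List Int) :=
  let Dc2_list := (PySem.List.pyRange 0 t_max 1).foldl (fun acc i =>
    let cx0 := PySem.List.pyGetD cx_list 0 0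
    let cy0 := PySem.List.pyGetD cy_list 0 0
    let cx := PySem.List.pyGetD cx_list i 0
    let cy := PySem.List.pyGetD cy_list i 0
    let Dc2 := (cx0 - cx)^2 + (cy0 - cy)^2
    acc ++ [Dc2]) []
  let Dc2_list_steps := (PySem.List.pyRange 0 (t_max + 1) 1).map
    (fun i => PySem.List.slice Dc2_list none (some i))
  let Dc2_list_steps := PySem.List.slice Dc2_list_steps (some 1) none
  (Dc2_list, Dc2_list_steps)

-- ===== PORT B =====
-- B's 'while cur: steps.append(cur); cur = cur[:-1]' loop (cur[:-1] = dropLast).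
def pvTrimSteps (cur : List Int) : List (List Int) :=
  if _h : cur = [] then [] else cur :: pvTrimSteps cur.dropLast
termination_by cur.length
decreasing_by
  have : cur.length ≠ 0 := fun h0 => _h (List.eq_nil_of_length_eq_zero h0)
  simp [List.length_dropLast]; omega

def centerOfMassDist_alt (cx_list : List Int) (cy_list : List Int) (t_max : Int) : List Int × List (List Int) :=
  let n := max t_max 0
  let Dc2_list := ((PySem.List.slice cx_list none (some n)).zip
                   (PySem.List.slice cy_list none (some n))).map
    (fun p => (PySem.List.pyGetD cx_list 0 0 - p.1)^2 + (PySem.List.pyGetD cy_list 0 0 - p.2)^2)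
  (Dc2_list, (pvTrimSteps Dc2_list).reverse)

-- ===== PRECONDITION & SPEC =====
-- Pre_ excludes exactly the inputs where Python A raises IndexError (t_max exceeding a list's length).
def Pre_centerOfMassDist (cx_list : List Int) (cy_list : List Int) (t_max : Int) : Prop :=
  t_max ≤ (cx_list.length : Int) ∧ t_max ≤ (cy_list.length : Int)
instance (cx_list : List Int) (cy_list : List Int) (t_max : Int) : Decidable (Pre_centerOfMassDist cx_list cy_list t_max) := by unfold Pre_centerOfMassDist; infer_instance
def pvWitness_centerOfMassDist : List Int × List Int × Int := ([1, 2, 3], [0, 1, 2], 3)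

def Spec_centerOfMassDist (cx_list : List Int) (cy_list : List Int) (t_max : Int) (out : List Int × List (List Int)) : Prop := out = centerOfMassDist_alt cx_list cy_list t_max
instance (cx_list : List Int) (cy_list : List Int) (t_max : Int) (out : List Int × List (List Int)) : Decidable (Spec_centerOfMassDist cx_list cy_list t_max out) := by unfold Spec_centerOfMassDist; infer_instance

-- ===== CLAIM (what is proved, stated in full; the proofs are below) =====
def Claim_equal_centerOfMassDist : Prop := ∀ (cx_list : List Int) (cy_list : List Int) (t_max : Int), Dom_centerOfMassDist cx_list cy_list t_max → Pre_centerOfMassDist cx_list cy_list t_max → Spec_centerOfMassDist cx_list cy_list t_max (centerOfMassDist cx_list cy_list t_max)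

-- ===== LEMMAS AND PROOFS =====

-- B's trim loop, reversed, lists the prefixes of ds in increasing length.
theorem pvTrimSteps_reverse (ds : List Int) :
    (pvTrimSteps ds).reverse = (List.range ds.length).map (fun k => ds.take (k + 1)) := by
  generalize hn : ds.length = n
  induction n generalizing ds with
  | zero =>
      have h : ds = [] := List.eq_nil_of_length_eq_zero hn
      subst h; simp [pvTrimSteps]
  | succ m ih =>
      have hne : ds ≠ [] := by intro h; subst h; simp at hn
      rw [pvTrimSteps, dif_neg hne, List.reverse_cons,
          ih ds.dropLast (by simp [List.length_dropLast, hn])]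
      rw [List.range_succ, List.map_append]
      congr 1
      · refine List.map_congr_left (fun k hk => ?_)
        have hkm : k < m := List.mem_range.mp hk
        rw [List.dropLast_eq_take, List.take_take, hn]
        congr 1; omega
      · simp [List.take_of_length_le, hn]

-- the zip-comprehension over the n-prefixes, pointwise
theorem zip_take_map (cx cy : List Int) (n : Nat) (hx : n ≤ cx.length) (hy : n ≤ cy.length)
    (g : Int → Int → Int) :
    ((cx.take n).zip (cy.take n)).map (fun p => g p.1 p.2) =
    (List.range n).map (fun k => g (cx.getD k 0) (cy.getD k 0)) := by
  apply List.ext_getElem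
  · simp; omega
  · intro i h1 h2
    have hi : i < n := by simpa using h2
    simp [List.getElem_zip, List.getElem_take, List.getD_eq_getElem?_getD,
      List.getElem?_eq_getElem (by omega : i < cx.length),
      List.getElem?_eq_getElem (by omega : i < cy.length)]

-- closed form of A's first loop
theorem a_list_closed (f : Int → Int) (t : Int) :
    (PySem.List.pyRange 0 t 1).foldl (fun acc i => acc ++ [f i]) [] =
    (PySem.List.pyRange 0 t 1).map f := by
  simpa using PySem.List.foldl_append_singleton_eq_map (f := f)
    (l := PySem.List.pyRange 0 t 1) (acc := [])

theorem pyRange_zero_map (n : Nat) :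
    PySem.List.pyRange 0 (n : Int) 1 = (List.range n).map Int.ofNat := by
  rw [PySem.List.pyRange_one]
  norm_num

-- A in closed form: the list is a map over range, the steps are its increasing prefixes.
theorem a_closed (cx cy : List Int) (n : Nat) :
    centerOfMassDist cx cy (n : Int) =
    ((List.range n).map (fun k =>
        (PySem.List.pyGetD cx 0 0 - PySem.List.pyGetD cx (Int.ofNat k) 0)^2
      + (PySem.List.pyGetD cy 0 0 - PySem.List.pyGetD cy (Int.ofNat k) 0)^2),
     (List.range n).map (fun k =>
       ((List.range n).map (fun j =>
          (PySem.List.pyGetD cx 0 0 - PySem.List.pyGetD cx (Int.ofNat j) 0)^2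
        + (PySem.List.pyGetD cy 0 0 - PySem.List.pyGetD cy (Int.ofNat j) 0)^2)).take (k + 1))) := by
  set f : Int → Int := fun i =>
    (PySem.List.pyGetD cx 0 0 - PySem.List.pyGetD cx i 0)^2
    + (PySem.List.pyGetD cy 0 0 - PySem.List.pyGetD cy i 0)^2 with hf
  unfold centerOfMassDist
  simp only []
  rw [a_list_closed f ((n : Int)), pyRange_zero_map, List.map_map]
  have hcast : ((n : Int) + 1) = ((n + 1 : Nat) : Int) := by push_cast; ring
  rw [hcast, pyRange_zero_map, List.map_map]
  refine Prod.ext rfl ?_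
  rw [PySem.List.slice_from_one, List.range_succ_eq_map]
  simp only [List.map_cons, List.tail_cons, List.map_map]
  refine List.map_congr_left (fun k hk => ?_)
  simp only [Function.comp]
  have h1 : Int.ofNat (Nat.succ k) = ((k + 1 : Nat) : Int) := by simp
  rw [h1, PySem.List.slice_to_natCast]
  rfl

theorem centerOfMassDist_spec_aux (cx cy : List Int) (t : Int)
    (hx : t ≤ (cx.length : Int)) (hy : t ≤ (cy.length : Int)) :
    centerOfMassDist cx cy t = centerOfMassDist_alt cx cy t := by
  rcases Int.lt_or_le t 0 with hneg | hpos
  · -- t < 0: both loops are empty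
    have hr : PySem.List.pyRange 0 t 1 = [] := PySem.List.pyRange_one_eq_nil (by omega)
    have hr1 : PySem.List.pyRange 0 (t + 1) 1 = [] := PySem.List.pyRange_one_eq_nil (by omega)
    have hmax : max t 0 = (0 : Int) := by omega
    simp [centerOfMassDist, centerOfMassDist_alt, hr, hr1, hmax, PySem.List.slice,
      pvTrimSteps]
  · obtain ⟨n, rfl⟩ : ∃ n : Nat, t = (n : Int) := ⟨t.toNat, by omega⟩
    have hxn : n ≤ cx.length := by exact_mod_cast hx
    have hyn : n ≤ cy.length := by exact_mod_cast hy
    rw [a_closed cx cy n]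
    unfold centerOfMassDist_alt
    simp only []
    have hmax : max ((n : Int)) 0 = ((n : Nat) : Int) := by omega
    rw [hmax, PySem.List.slice_to_natCast, PySem.List.slice_to_natCast]
    rw [zip_take_map cx cy n hxn hyn
      (fun a b => (PySem.List.pyGetD cx 0 0 - a)^2 + (PySem.List.pyGetD cy 0 0 - b)^2)]
    have hfun : ∀ k : Nat,
        (PySem.List.pyGetD cx 0 0 - PySem.List.pyGetD cx (Int.ofNat k) 0)^2
        + (PySem.List.pyGetD cy 0 0 - PySem.List.pyGetD cy (Int.ofNat k) 0)^2
        = (PySem.List.pyGetD cx 0 0 - cx.getD k 0)^2 + (PySem.List.pyGetD cy 0 0 - cy.getD k 0)^2 := by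
      intro k
      have h1 : Int.ofNat k = ((k : Nat) : Int) := rfl
      rw [h1, PySem.List.pyGetD_natCast, PySem.List.pyGetD_natCast]
    refine Prod.ext ?_ ?_
    · simp only []
      exact List.map_congr_left (fun k _ => hfun k)
    · simp only []
      rw [pvTrimSteps_reverse]
      have hlen : ((List.range n).map (fun k =>
          (PySem.List.pyGetD cx 0 0 - cx.getD k 0)^2
          + (PySem.List.pyGetD cy 0 0 - cy.getD k 0)^2)).length = n := by simp
      rw [hlen]
      refine List.map_congr_left (fun k _ => ?_)
      congr 1
      exact List.map_congr_left (fun j _ => hfun j)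

-- ===== VERDICT (by name: the statement is the Claim_ definition above) =====
theorem centerOfMassDist_spec : Claim_equal_centerOfMassDist := by
  intro cx cy t _ hpre
  exact centerOfMassDist_spec_aux cx cy t hpre.1 hpre.2
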